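-- pv_equiv track=rewrite | github.com/TommyLau-bit/Contact-Tracing | contact.py | find_most_viral
-- ===== SOURCE A (Python) =====
-- def find_most_viral(contacts_dic):
--     """Return the most viral contacts: those sick people with the largest
--     contact list
--
--     Args:
--         contacts_dic (dic): each entry is a sick person's name and their list
--         of contacts.
--
--     Returns:
--         list: contains the names of sick people who have the largest contact
--         lists
--     """
--     # Remove pass and fill in your code here
--     max_infected = 0
--     most_viral_people = []
--     for p in contacts_dic.keys(): #loop through all sick people
--         if len(contacts_dic[p])>max_infected: #if number of contacts greater than prrevious max
--             max_infected = len(contacts_dic[p]) #update max number of contacts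
--             most_viral_people = [p] #reassign most viral people as list containing only this sick person
--         elif len(contacts_dic[p])==max_infected:
--             most_viral_people.append(p) #if this sick person has same number as max_innfected append it to list
--     return most_viral_people
-- ===== SOURCE B (Python) =====
-- def find_most_viral(contacts_dic):
--     """Two-pass version: first compute the maximum contact-list length,
--     then keep the people whose list has that length (insertion order)."""
--     max_len = max((len(v) for v in contacts_dic.values()), default=0)
--     return [p for p, v in contacts_dic.items() if len(v) == max_len]
-- ===== Notes on version B (the rewrite author's own statement) =====
-- stated objective: simpler
-- what changed: Replaces the fused single-pass running-max loop that rebuilds/appends to the tie list as it goes with two plain passes: a generator max over the values (default=0) followed by a list comprehension filtering the keys by that maximum.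
import Mathlib
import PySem

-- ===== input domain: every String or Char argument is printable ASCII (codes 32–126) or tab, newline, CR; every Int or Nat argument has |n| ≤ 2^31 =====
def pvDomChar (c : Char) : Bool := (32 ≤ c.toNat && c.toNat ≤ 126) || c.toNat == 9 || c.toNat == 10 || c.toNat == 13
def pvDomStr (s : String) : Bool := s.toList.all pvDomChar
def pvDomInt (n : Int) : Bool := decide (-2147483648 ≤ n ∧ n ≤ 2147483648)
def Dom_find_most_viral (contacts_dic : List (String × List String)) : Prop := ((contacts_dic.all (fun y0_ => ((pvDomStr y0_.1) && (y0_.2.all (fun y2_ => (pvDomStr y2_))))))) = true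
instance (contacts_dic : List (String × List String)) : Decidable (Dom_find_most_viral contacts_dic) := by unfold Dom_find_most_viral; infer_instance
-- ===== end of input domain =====

-- B replaces A's fused running-max-with-tie-list loop by two separate passes (max of the lengths, then a filter by that max); same O(n) cost, simpler shape.


-- ===== PORT A =====
-- A: one fused pass keeping (max_infected, most_viral_people); iterating the dict's
-- keys with their values is iterating the association list's pairs in order.
def find_most_viral (contacts_dic : List (String × List String)) : List String :=
  (contacts_dic.foldl
    (fun st p =>
      if st.1 < (p.2.length : Int) then ((p.2.length : Int), [p.1])
      else if (p.2.length : Int) = st.1 then (st.1, st.2 ++ [p.1])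
      else st)
    ((0 : Int), ([] : List String))).2

-- ===== PORT B =====
-- B: max over the values' lengths with default 0 (PySem.List.maxD = max(..., default=0)),
-- then a comprehension over the items keeping those whose length equals it.
def find_most_viral_alt (contacts_dic : List (String × List String)) : List String :=
  let max_len : Int := PySem.List.maxD (contacts_dic.map (fun p => (p.2.length : Int))) (fun x => x) 0
  (contacts_dic.filter (fun p => (p.2.length : Int) == max_len)).map (fun p => p.1)

-- ===== PRECONDITION & SPEC =====
def Spec_find_most_viral (contacts_dic : List (String × List String)) (out : List String) : Prop := out = find_most_viral_alt contacts_dic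
instance (contacts_dic : List (String × List String)) (out : List String) : Decidable (Spec_find_most_viral contacts_dic out) := by unfold Spec_find_most_viral; infer_instance

-- ===== CLAIM (what is proved, stated in full; the proofs are below) =====
def Claim_equal_find_most_viral : Prop := ∀ (contacts_dic : List (String × List String)), Dom_find_most_viral contacts_dic → Spec_find_most_viral contacts_dic (find_most_viral contacts_dic)

-- ===== LEMMAS AND PROOFS =====

-- A's loop from any state (m, acc): the final max is the running max of m over the
-- lengths, and the final list is acc (kept only if the max never rose) followed by
-- the names whose length equals the final max.
lemma find_most_viral_loop (cd : List (String × List String)) (m : Int) (acc : List String) :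
    cd.foldl
      (fun st p =>
        if st.1 < (p.2.length : Int) then ((p.2.length : Int), [p.1])
        else if (p.2.length : Int) = st.1 then (st.1, st.2 ++ [p.1])
        else st)
      (m, acc)
    = (cd.foldl (fun a q => max a (q.2.length : Int)) m,
       (if m = cd.foldl (fun a q => max a (q.2.length : Int)) m then acc else []) ++
         (cd.filter (fun p => (p.2.length : Int) == cd.foldl (fun a q => max a (q.2.length : Int)) m)).map
           (fun p => p.1)) := by
  induction cd generalizing m acc with
  | nil => simp
  | cons p t ih =>
    simp only [List.foldl_cons]
    have hle := (PySem.List.le_foldl_max_int t (fun q => (q.2.length : Int)) (max m (p.2.length : Int))).1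
    by_cases h1 : m < (p.2.length : Int)
    · have hmax : max m (p.2.length : Int) = (p.2.length : Int) := max_eq_right h1.le
      rw [if_pos h1, ih]; simp only [hmax]
      have hmM : m ≠ t.foldl (fun a q => max a (q.2.length : Int)) (p.2.length : Int) := by
        rw [hmax] at hle
        exact ne_of_lt (lt_of_lt_of_le h1 hle)
      rw [if_neg hmM, List.filter_cons]
      by_cases hp : (p.2.length : Int) = t.foldl (fun a q => max a (q.2.length : Int)) (p.2.length : Int)
      · simp [← hp]
      · simp [hp]
    · rw [if_neg h1]
      by_cases h2 : (p.2.length : Int) = m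
      · have hmax : max m (p.2.length : Int) = m := max_eq_left (le_of_eq h2)
        rw [if_pos h2, ih]; simp only [hmax]
        rw [List.filter_cons]
        by_cases hm : m = t.foldl (fun a q => max a (q.2.length : Int)) m
        · simp [h2, ← hm]
        · have hp : ¬ ((p.2.length : Int) = t.foldl (fun a q => max a (q.2.length : Int)) m) := by
            rw [h2]; exact hm
          simp [if_neg hm, hp]
      · have h3 : (p.2.length : Int) < m := lt_of_le_of_ne (not_lt.mp h1) h2
        have hmax : max m (p.2.length : Int) = m := max_eq_left h3.le
        rw [if_neg h2, ih]; simp only [hmax]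
        rw [List.filter_cons]
        have hp : ¬ ((p.2.length : Int) = t.foldl (fun a q => max a (q.2.length : Int)) m) := by
          rw [hmax] at hle
          exact ne_of_lt (lt_of_lt_of_le h3 hle)
        simp [hp]

-- max(xs, default=0) on a list of nonnegative integers is the running max from 0.
lemma maxD_nonneg_eq_foldl (xs : List Int) (h : ∀ x ∈ xs, 0 ≤ x) :
    PySem.List.maxD xs (fun x => x) 0 = xs.foldl max 0 := by
  cases xs with
  | nil => rfl
  | cons x t =>
    have hx : (0:Int) ≤ x := h x (by simp)
    simp [PySem.List.maxD, PySem.List.max?_id_cons, max_eq_right hx]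

-- ===== VERDICT (by name: the statement is the Claim_ definition above) =====
theorem find_most_viral_spec : Claim_equal_find_most_viral := by
  intro cd _
  unfold Spec_find_most_viral find_most_viral find_most_viral_alt
  rw [find_most_viral_loop cd 0 []]
  rw [maxD_nonneg_eq_foldl (cd.map (fun p => (p.2.length : Int)))
    (by intro x hx; rcases List.mem_map.mp hx with ⟨p, _, rfl⟩; positivity)]
  rw [List.foldl_map]
  simp
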